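-- pv_equiv track=rewrite | github.com/jd0924/hyperinformed | tts-generate-say.py | parse_narration
-- ===== SOURCE A (Python) =====
-- def parse_narration(text):
--     """Parse narration text into segments with type markers."""
--     segments = []
--     lines = text.strip().split("\n")
--     current_text = []
--
--     def flush_text():
--         joined = " ".join(current_text).strip()
--         if joined:
--             segments.append(("text", joined))
--         current_text.clear()
--
--     for line in lines:
--         stripped = line.strip()
--         if not stripped:
--             continue
--         if stripped.startswith("[SECTION]"):
--             flush_text()
--             segments.append(("section", stripped[len("[SECTION]"):].strip()))
--         elif stripped.startswith("[TOPIC]"):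
--             flush_text()
--             segments.append(("topic", stripped[len("[TOPIC]"):].strip()))
--         elif stripped == "[PAUSE]":
--             flush_text()
--             segments.append(("pause", ""))
--         else:
--             current_text.append(stripped)
--
--     flush_text()
--     return segments
-- ===== SOURCE B (Python) =====
-- def _classify(line):
--     """Map one line to a token, or None for a blank line."""
--     s = line.strip()
--     if not s:
--         return None
--     if s.startswith("[SECTION]"):
--         return ("section", s[len("[SECTION]"):].strip())
--     if s.startswith("[TOPIC]"):
--         return ("topic", s[len("[TOPIC]"):].strip())
--     if s == "[PAUSE]":
--         return ("pause", "")
--     return ("text", s)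
--
--
-- def parse_narration(text):
--     """Parse narration text into segments with type markers."""
--     tokens = [t for t in map(_classify, text.strip().split("\n")) if t is not None]
--     out = []
--     i, n = 0, len(tokens)
--     while i < n:
--         kind, val = tokens[i]
--         if kind != "text":
--             out.append((kind, val))
--             i += 1
--         else:
--             j = i + 1
--             while j < n and tokens[j][0] == "text":
--                 j += 1
--             out.append(("text", " ".join(v for _, v in tokens[i:j])))
--             i = j
--     return out
-- ===== Notes on version B (the rewrite author's own statement) =====
-- stated objective: alternative
-- what changed: Replaces the stateful single pass with a mutating flush-accumulator closure by a two-pass classify-then-group shape: each line is first mapped to a typed token (or dropped if blank), then consecutive text tokens are grouped by an index scan that joins each run with single spaces.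
import Mathlib
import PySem

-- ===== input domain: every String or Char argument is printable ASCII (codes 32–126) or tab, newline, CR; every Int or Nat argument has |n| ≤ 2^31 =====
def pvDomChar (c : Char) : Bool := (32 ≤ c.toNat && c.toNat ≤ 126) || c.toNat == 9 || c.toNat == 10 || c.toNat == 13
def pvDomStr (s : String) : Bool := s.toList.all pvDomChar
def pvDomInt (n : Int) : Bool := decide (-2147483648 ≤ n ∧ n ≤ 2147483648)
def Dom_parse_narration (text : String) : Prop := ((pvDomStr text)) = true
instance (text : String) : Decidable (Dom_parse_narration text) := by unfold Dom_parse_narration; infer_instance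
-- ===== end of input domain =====

-- B replaces A's single pass with a mutating flush-accumulator by a two-pass classify-then-group shape (alternative decomposition, same cost).

-- ===== PORT A =====
-- flush_text: append the joined pending text (if nonempty) and clear the accumulator
def pvFlushA (segs : List (String × String)) (cur : List String) : List (String × String) :=
  let joined := PySem.Str.strip (PySem.Str.join " " cur)
  if joined ≠ "" then segs ++ [("text", joined)] else segs

-- one iteration of A's for-loop over (segments, current_text)
def pvStepA (st : List (String × String) × List String) (line : String) :
    List (String × String) × List String :=
  let stripped := PySem.Str.strip line
  if stripped = "" then st
  else if PySem.Str.startswith stripped "[SECTION]" then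
    (pvFlushA st.1 st.2 ++ [("section", PySem.Str.strip (PySem.Str.slice stripped (some 9) none))], [])
  else if PySem.Str.startswith stripped "[TOPIC]" then
    (pvFlushA st.1 st.2 ++ [("topic", PySem.Str.strip (PySem.Str.slice stripped (some 7) none))], [])
  else if stripped = "[PAUSE]" then
    (pvFlushA st.1 st.2 ++ [("pause", "")], [])
  else (st.1, st.2 ++ [stripped])

def parse_narration (text : String) : List (String × String) :=
  -- split? is some for the nonempty separator "\n"; getD [] is never taken
  let lines := (PySem.Str.split? (PySem.Str.strip text) "\n").getD []
  let st := lines.foldl pvStepA ([], [])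
  pvFlushA st.1 st.2

-- ===== PORT B =====
-- _classify: one line to a typed token, none for a blank line
def pvClassifyB (line : String) : Option (String × String) :=
  let s := PySem.Str.strip line
  if s = "" then none
  else if PySem.Str.startswith s "[SECTION]" then
    some ("section", PySem.Str.strip (PySem.Str.slice s (some 9) none))
  else if PySem.Str.startswith s "[TOPIC]" then
    some ("topic", PySem.Str.strip (PySem.Str.slice s (some 7) none))
  else if s = "[PAUSE]" then some ("pause", "")
  else some ("text", s)

-- B's grouping scan; fuel (= token-list length at the call site) only makes the
-- index-scan loop structural recursion, it never runs out
def pvGroupB (fuel : Nat) (toks : List (String × String)) : List (String × String) :=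
  match fuel, toks with
  | _, [] => []
  | 0, _ :: _ => []
  | fuel + 1, (k, v) :: rest =>
    if k = "text" then
      let run := rest.takeWhile (fun t => t.1 == "text")
      ("text", PySem.Str.join " " (v :: run.map Prod.snd))
        :: pvGroupB fuel (rest.dropWhile (fun t => t.1 == "text"))
    else (k, v) :: pvGroupB fuel rest

def parse_narration_alt (text : String) : List (String × String) :=
  let lines := (PySem.Str.split? (PySem.Str.strip text) "\n").getD []
  let toks := lines.filterMap pvClassifyB
  pvGroupB toks.length toks

-- ===== PRECONDITION & SPEC =====
def Spec_parse_narration (text : String) (out : List (String × String)) : Prop := out = parse_narration_alt text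
instance (text : String) (out : List (String × String)) : Decidable (Spec_parse_narration text out) := by unfold Spec_parse_narration; infer_instance

-- ===== CLAIM (what is proved, stated in full; the proofs are below) =====
def Claim_equal_parse_narration : Prop := ∀ (text : String), Dom_parse_narration text → Spec_parse_narration text (parse_narration text)

-- ===== LEMMAS AND PROOFS =====

-- abstract step on classified tokens: what pvStepA does once the line is classified
def pvStepT (st : List (String × String) × List String) (t : String × String) :
    List (String × String) × List String :=
  if t.1 = "text" then (st.1, st.2 ++ [t.2]) else (pvFlushA st.1 st.2 ++ [t], [])

lemma stepA_eq_classify (st : List (String × String) × List String) (line : String) :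
    pvStepA st line = (pvClassifyB line).elim st (pvStepT st) := by
  unfold pvStepA pvClassifyB pvStepT
  dsimp only
  split_ifs <;> simp_all

lemma foldA_eq_foldT (lines : List String) (st : List (String × String) × List String) :
    lines.foldl pvStepA st = (lines.filterMap pvClassifyB).foldl pvStepT st := by
  induction lines generalizing st with
  | nil => rfl
  | cons l ls ih =>
    simp only [List.foldl_cons, List.filterMap_cons, stepA_eq_classify]
    cases h : pvClassifyB l <;> simp [ih]

-- a "clean" char list: nonempty, no leading or trailing Python whitespace
def pvCleanC (cs : List Char) : Prop :=
  cs ≠ [] ∧ (∀ a ∈ cs.head?, PySem.Chars.isspace a = false) ∧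
    (∀ b ∈ cs.reverse.head?, PySem.Chars.isspace b = false)

def pvCleanS (v : String) : Prop := pvCleanC v.toList

lemma dropWhile_eq_self_of_head {α : Type} (p : α → Bool) (l : List α)
    (h : ∀ a ∈ l.head?, p a = false) : l.dropWhile p = l := by
  cases l with
  | nil => rfl
  | cons a t => simp [h a (by simp)]

lemma head?_dropWhile {α : Type} (p : α → Bool) (l : List α) :
    ∀ a ∈ (l.dropWhile p).head?, p a = false := by
  induction l with
  | nil => simp
  | cons a t ih =>
    intro b hb
    by_cases h : p a
    · exact ih b (by simpa [List.dropWhile_cons, h] using hb)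
    · simp [h] at hb
      subst hb
      simpa using h

lemma clean_strip_id (cs : List Char) (h : pvCleanC cs) : PySem.Chars.strip cs = cs := by
  obtain ⟨-, h1, h2⟩ := h
  have hl : PySem.Chars.lstrip cs = cs :=
    dropWhile_eq_self_of_head _ _ h1
  have hr : PySem.Chars.rstrip cs = cs := by
    unfold PySem.Chars.rstrip
    rw [dropWhile_eq_self_of_head _ _ h2, List.reverse_reverse]
  simp [PySem.Chars.strip, hl, hr]

lemma strip_clean (cs : List Char) (h : PySem.Chars.strip cs ≠ []) :
    pvCleanC (PySem.Chars.strip cs) := by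
  refine ⟨h, ?_, ?_⟩
  · -- head of rstrip y equals head of y (rstrip y is a prefix of y), and head of lstrip is non-space
    intro a ha
    set y := PySem.Chars.lstrip cs with hy
    have hz : PySem.Chars.strip cs = PySem.Chars.rstrip y := by
      simp [PySem.Chars.strip, hy]
    have hpre : PySem.Chars.rstrip y <+: y := by
      have h1 : (List.dropWhile PySem.Chars.isspace y.reverse).reverse <+: y.reverse.reverse :=
        List.reverse_prefix.mpr (List.dropWhile_suffix _)
      simpa [PySem.Chars.rstrip] using h1
    obtain ⟨t, ht⟩ := hpre
    rw [hz] at ha h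
    cases hrw : PySem.Chars.rstrip y with
    | nil => exact absurd hrw h
    | cons b bs =>
      rw [hrw] at ha ht
      simp only [List.head?_cons, Option.mem_def, Option.some.injEq] at ha
      rw [← ha]
      have hmem : b ∈ y.head? := by rw [← ht]; simp
      have hy' : y = cs.dropWhile PySem.Chars.isspace := by simp [hy, PySem.Chars.lstrip]
      exact head?_dropWhile _ cs b (hy' ▸ hmem)
  · intro b hb
    have hmem : b ∈ ((PySem.Chars.lstrip cs).reverse.dropWhile PySem.Chars.isspace).head? := by
      simpa [PySem.Chars.strip, PySem.Chars.rstrip] using hb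
    exact head?_dropWhile _ _ b hmem

lemma clean_glue (x y : List Char) (hx : pvCleanC x) (hy : pvCleanC y) :
    pvCleanC (x ++ ' ' :: y) := by
  obtain ⟨hx0, hx1, hx2⟩ := hx
  obtain ⟨hy0, hy2, hy1⟩ := hy
  refine ⟨by simp, ?_, ?_⟩
  · intro a ha
    cases x with
    | nil => exact absurd rfl hx0
    | cons c t => simp at ha; exact hx1 a (by simp [ha])
  · intro b hb
    cases hyr : y.reverse with
    | nil => exact absurd (by simpa using congrArg List.reverse hyr) hy0
    | cons c t =>
      have : (x ++ ' ' :: y).reverse = c :: (t ++ ' ' :: x.reverse) := by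
        simp [hyr]
      rw [this] at hb
      simp only [List.head?_cons, Option.mem_def, Option.some.injEq] at hb
      rw [← hb]
      exact hy1 c (by simp [hyr])

lemma join_clean (vs : List (List Char)) (v : List Char) (hv : pvCleanC v)
    (hvs : ∀ u ∈ vs, pvCleanC u) : pvCleanC (PySem.Chars.join [' '] (v :: vs)) := by
  induction vs generalizing v with
  | nil => simpa [PySem.Chars.join_singleton] using hv
  | cons u t ih =>
    rw [PySem.Chars.join_cons_cons]
    have h2 := ih u (hvs u (by simp)) (fun w hw => hvs w (by simp [hw]))
    simpa using clean_glue v _ hv h2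

lemma str_ne_empty_iff (s : String) : s ≠ "" ↔ s.toList ≠ [] := by
  constructor
  · intro h h2; exact h (by cases s with | _ l => simpa using congrArg String.ofList h2)
  · intro h h2; simp [h2] at h

lemma flushA_clean (segs : List (String × String)) (cur : List String)
    (h0 : cur ≠ []) (h : ∀ v ∈ cur, pvCleanS v) :
    pvFlushA segs cur = segs ++ [("text", PySem.Str.join " " cur)] := by
  cases cur with
  | nil => exact absurd rfl h0
  | cons v vs =>
    have hc : pvCleanC ((PySem.Str.join " " (v :: vs)).toList) := by
      rw [PySem.Str.toList_join]
      simp only [List.map_cons]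
      exact join_clean _ _ (h v (by simp)) (fun u hu => by
        obtain ⟨w, hw, rfl⟩ := List.mem_map.mp hu
        exact h w (by simp [hw]))
    have hstrip : PySem.Str.strip (PySem.Str.join " " (v :: vs)) = PySem.Str.join " " (v :: vs) := by
      unfold PySem.Str.strip
      rw [clean_strip_id _ hc, String.ofList_toList]
    have hne : PySem.Str.join " " (v :: vs) ≠ "" :=
      (str_ne_empty_iff _).mpr hc.1
    unfold pvFlushA
    simp [hstrip, hne]

lemma flushA_append (segs : List (String × String)) (cur : List String) :
    pvFlushA segs cur = segs ++ pvFlushA [] cur := by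
  unfold pvFlushA; dsimp only; split_ifs <;> simp

lemma flushA_nil (segs : List (String × String)) : pvFlushA segs [] = segs := by
  simp [pvFlushA, PySem.Str.join, PySem.Chars.join, PySem.Str.strip, PySem.Chars.strip,
    PySem.Chars.lstrip, PySem.Chars.rstrip, List.intercalate]

-- fuel irrelevance for pvGroupB
lemma groupB_fuel (f1 : Nat) : ∀ (f2 : Nat) (toks : List (String × String)),
    toks.length ≤ f1 → toks.length ≤ f2 → pvGroupB f1 toks = pvGroupB f2 toks := by
  induction f1 with
  | zero =>
    intro f2 toks h1 _
    have : toks = [] := List.length_eq_zero_iff.mp (Nat.le_zero.mp h1)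
    subst this; cases f2 <;> rfl
  | succ n ih =>
    intro f2 toks h1 h2
    cases toks with
    | nil => cases f2 <;> rfl
    | cons t rest =>
      obtain ⟨m, rfl⟩ : ∃ m, f2 = m + 1 := by
        cases f2 with
        | zero => simp at h2
        | succ m => exact ⟨m, rfl⟩
      obtain ⟨k, v⟩ := t
      simp only [pvGroupB]
      split_ifs with hk
      · have hd := List.length_dropWhile_le (fun t : String × String => t.1 == "text") rest
        have hrest : rest.length ≤ n := by simpa using h1
        have hrest2 : rest.length ≤ m := by simpa using h2
        rw [ih m _ (le_trans hd hrest) (le_trans hd hrest2)]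
      · rw [ih m rest (by simpa using h1) (by simpa using h2)]

lemma map_text_takeWhile (cs : List String) (r : List (String × String)) (k : String) (v : String)
    (hk : k ≠ "text") :
    ((cs.map (fun v => ("text", v))) ++ (k, v) :: r).takeWhile (fun t => t.1 == "text")
        = cs.map (fun v => ("text", v)) ∧
    ((cs.map (fun v => ("text", v))) ++ (k, v) :: r).dropWhile (fun t => t.1 == "text")
        = (k, v) :: r := by
  induction cs with
  | nil => simp [hk]
  | cons c t ih => simp [ih]

lemma map_text_takeWhile_nil (cs : List String) :
    ((cs.map (fun v => ("text", v)))).takeWhile (fun t => t.1 == "text")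
        = cs.map (fun v => ("text", v)) ∧
    ((cs.map (fun v => ("text", v)))).dropWhile (fun t => t.1 == "text") = [] := by
  induction cs with
  | nil => simp
  | cons c t ih => simp [ih]

-- grouping a full pending run terminated by a marker
lemma groupB_run (cur : List String) (k v : String) (ts : List (String × String)) (fuel : Nat)
    (hc : ∀ u ∈ cur, pvCleanS u) (hk : k ≠ "text")
    (hf : cur.length + 1 + ts.length ≤ fuel) :
    pvGroupB fuel (cur.map (fun v => ("text", v)) ++ (k, v) :: ts)
      = pvFlushA [] cur ++ (k, v) :: pvGroupB ts.length ts := by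
  cases cur with
  | nil =>
    obtain ⟨m, rfl⟩ : ∃ m, fuel = m + 1 := by
      cases fuel with
      | zero => omega
      | succ m => exact ⟨m, rfl⟩
    simp only [List.map_nil, List.nil_append, pvGroupB]
    rw [if_neg hk, groupB_fuel m ts.length ts (by simp at hf; omega) le_rfl, flushA_nil]
    simp
  | cons c cs =>
    obtain ⟨m, rfl⟩ : ∃ m, fuel = m + 1 := by
      cases fuel with
      | zero => omega
      | succ m => exact ⟨m, rfl⟩
    obtain ⟨htw, hdw⟩ := map_text_takeWhile cs ts k v hk
    simp only [List.map_cons, List.cons_append, pvGroupB, htw, hdw]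
    rw [if_true]
    obtain ⟨m', rfl⟩ : ∃ m', m = m' + 1 := by
      cases m with
      | zero => simp at hf; omega
      | succ m' => exact ⟨m', rfl⟩
    simp only [pvGroupB]
    rw [if_neg hk, groupB_fuel m' ts.length ts (by simp at hf ⊢; omega) le_rfl]
    rw [flushA_clean [] (c :: cs) (by simp) hc]
    simp [Function.comp_def]

-- grouping a trailing pending run (no marker after it)
lemma groupB_run_end (cur : List String) (fuel : Nat)
    (hc : ∀ u ∈ cur, pvCleanS u) (hf : cur.length ≤ fuel) :
    pvGroupB fuel (cur.map (fun v => ("text", v))) = pvFlushA [] cur := by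
  cases cur with
  | nil => rw [flushA_nil]; cases fuel <;> rfl
  | cons c cs =>
    obtain ⟨m, rfl⟩ : ∃ m, fuel = m + 1 := by
      cases fuel with
      | zero => simp at hf
      | succ m => exact ⟨m, rfl⟩
    obtain ⟨htw, hdw⟩ := map_text_takeWhile_nil cs
    simp only [List.map_cons, pvGroupB, htw, hdw]
    rw [if_true]
    rw [flushA_clean [] (c :: cs) (by simp) hc]
    cases m <;> simp [Function.comp_def]

-- main invariant: A's fold-and-flush from state (segs, cur) is segs ++ grouped (pending ++ toks)
lemma main_inv (toks : List (String × String)) :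
    ∀ (segs : List (String × String)) (cur : List String),
    (∀ t ∈ toks, t.1 = "text" → pvCleanS t.2) → (∀ v ∈ cur, pvCleanS v) →
    pvFlushA (toks.foldl pvStepT (segs, cur)).1 (toks.foldl pvStepT (segs, cur)).2
      = segs ++ pvGroupB (cur.length + toks.length) (cur.map (fun v => ("text", v)) ++ toks) := by
  induction toks with
  | nil =>
    intro segs cur _ hcur
    simp only [List.foldl_nil, List.append_nil]
    rw [groupB_run_end cur _ hcur (by simp), flushA_append]
  | cons t ts ih =>
    intro segs cur htoks hcur
    obtain ⟨k, v⟩ := t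
    by_cases hk : k = "text"
    · subst hk
      have hv : pvCleanS v := htoks ("text", v) (by simp) rfl
      have hstep : pvStepT (segs, cur) ("text", v) = (segs, cur ++ [v]) := by
        simp [pvStepT]
      have h2 := ih segs (cur ++ [v]) (fun t ht h => htoks t (by simp [ht]) h)
        (by intro u hu; rcases List.mem_append.mp hu with h | h
            · exact hcur u h
            · simp at h; subst h; exact hv)
      have hlen : (cur ++ [v]).length + ts.length = cur.length + (("text", v) :: ts).length := by
        simp; omega
      have hlist : (cur ++ [v]).map (fun v => ("text", v)) ++ ts
          = cur.map (fun v => ("text", v)) ++ ("text", v) :: ts := by simp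
      rw [hlen, hlist] at h2
      simpa only [List.foldl_cons, hstep] using h2
    · simp only [List.foldl_cons, pvStepT, if_neg hk]
      have := ih (pvFlushA segs cur ++ [(k, v)]) [] (fun t ht h => htoks t (by simp [ht]) h)
        (by simp)
      rw [this, groupB_run cur k v ts _ hcur hk (by simp; omega)]
      rw [flushA_append segs cur]
      simp

lemma classify_text_clean (line : String) (v : String)
    (h : pvClassifyB line = some ("text", v)) : pvCleanS v := by
  unfold pvClassifyB at h
  dsimp only at h
  split_ifs at h with h1 h2 h3 h4 <;> simp_all
  subst h
  unfold pvCleanS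
  rw [PySem.Str.toList_strip]
  exact strip_clean _ (by
    intro hnil
    exact h1 (by
      have : (PySem.Str.strip line).toList = [] := by rw [PySem.Str.toList_strip, hnil]
      cases hs : PySem.Str.strip line with
      | _ l => simpa [hs] using this))

-- ===== VERDICT (by name: the statement is the Claim_ definition above) =====
theorem parse_narration_spec : Claim_equal_parse_narration := by
  intro text _
  unfold Spec_parse_narration parse_narration parse_narration_alt
  simp only
  rw [foldA_eq_foldT]
  set lines := (PySem.Str.split? (PySem.Str.strip text) "\n").getD [] with hl
  set toks := lines.filterMap pvClassifyB with ht
  have hclean : ∀ t ∈ toks, t.1 = "text" → pvCleanS t.2 := by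
    intro t hmem hk
    obtain ⟨line, -, hcl⟩ := List.mem_filterMap.mp (ht ▸ hmem)
    obtain ⟨k, v⟩ := t
    simp at hk; subst hk
    exact classify_text_clean line v hcl
  have := main_inv toks [] [] hclean (by simp)
  simpa using this
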